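-- pv_equiv track=rewrite | github.com/Vladikuzasnij/Latvian-University | 1. Kurss 2. semestris Programmešana un datori II/1MPR01/2.uzd_MPR01.py | solve_equation_ax3_plus_by2_plus_cz_plus_d_equals_0
-- ===== SOURCE A (Python) =====
-- def solve_equation_ax3_plus_by2_plus_cz_plus_d_equals_0(a, b, c, d):
--     # Funkcija atrod visus veselos atrisinājumus vienādojumam ax^3 + by^2 + cz + d = 0
--     # Funkcija izmanto pilno pārlasi. Tālak funkcija nodot "kortežus" (x, y, z) veidā kā vienu lielo simbolu virkni
--     # a - funkcijas parametrs a (ax^3 + ...)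
--     # b - funkcijas parametrs b (... + by^2 + ...)
--     # c - funkcijas parametrs c (... + cz + ...)
--     # d - funkcijas parametrs d (... + d = 0)
--     sv = ""
--     for x in range(-10, 11):
--         for y in range(-10, 11):
--             for z in range(-10, 11):
--                 if a * x * x * x + b * y * y + c * z + d == 0:
--                     sv += "(" + str(x) + ", " + str(y) + ", " + str(z) + ")\n"
--     return sv
-- ===== SOURCE B (Python) =====
-- def _z_candidates(a, b, c, d, x, y):
--     # Solutions z in -10..10 of c*z == rem, found by division instead of scanning.
--     rem = -(a * x ** 3 + b * y ** 2 + d)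
--     if c == 0:
--         return list(range(-10, 11)) if rem == 0 else []
--     q, r = divmod(rem, c)
--     return [q] if r == 0 and -10 <= q <= 10 else []
--
--
-- def solve_equation_ax3_plus_by2_plus_cz_plus_d_equals_0(a, b, c, d):
--     # Build all solution triples via a flat comprehension (solving for z per (x, y)),
--     # then join the formatted lines once.
--     return "".join(
--         "(" + str(x) + ", " + str(y) + ", " + str(z) + ")\n"
--         for x in range(-10, 11)
--         for y in range(-10, 11)
--         for z in _z_candidates(a, b, c, d, x, y)
--     )
-- ===== Notes on version B (the rewrite author's own statement) =====
-- stated objective: faster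
-- what changed: Instead of a triple nested loop accumulating a string, B solves c*z = rem by divmod per (x, y) in a helper, builds the solution lines with a flat comprehension and joins them once, removing the innermost 21-way scan.
import Mathlib
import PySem

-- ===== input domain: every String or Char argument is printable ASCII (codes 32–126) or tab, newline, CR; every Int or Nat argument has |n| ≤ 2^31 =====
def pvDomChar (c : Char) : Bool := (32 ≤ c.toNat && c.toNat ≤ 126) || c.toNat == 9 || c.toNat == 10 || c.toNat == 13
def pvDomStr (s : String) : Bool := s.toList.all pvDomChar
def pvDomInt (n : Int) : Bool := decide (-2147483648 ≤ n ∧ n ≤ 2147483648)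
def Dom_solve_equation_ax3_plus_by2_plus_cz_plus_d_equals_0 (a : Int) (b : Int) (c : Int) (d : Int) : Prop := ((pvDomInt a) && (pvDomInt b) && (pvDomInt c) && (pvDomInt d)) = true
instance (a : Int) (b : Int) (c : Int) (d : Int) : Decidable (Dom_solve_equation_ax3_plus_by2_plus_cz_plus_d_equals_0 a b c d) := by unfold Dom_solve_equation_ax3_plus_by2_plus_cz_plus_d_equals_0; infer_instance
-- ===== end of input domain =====

-- B builds the solution triples by solving c*z = rem with divmod per (x, y) and joins the
-- formatted lines once (no innermost scan, no string accumulator); same output, same order.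

-- ===== PORT A =====
def solve_equation_ax3_plus_by2_plus_cz_plus_d_equals_0 (a : Int) (b : Int) (c : Int) (d : Int) : String :=
  (PySem.List.pyRange (-10) 11 1).foldl (fun sv x =>
    (PySem.List.pyRange (-10) 11 1).foldl (fun sv y =>
      (PySem.List.pyRange (-10) 11 1).foldl (fun sv z =>
        if a * x * x * x + b * y * y + c * z + d = 0 then
          sv ++ ("(" ++ PySem.Int.toStr x ++ ", " ++ PySem.Int.toStr y ++ ", " ++ PySem.Int.toStr z ++ ")\n")
        else sv) sv) sv) ""

-- ===== PORT B =====
-- helper _z_candidates: the z-solutions of c*z = rem inside -10..10, by division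
def pv_z_candidates (a : Int) (b : Int) (c : Int) (d : Int) (x : Int) (y : Int) : List Int :=
  let rem := -(a * x ^ 3 + b * y ^ 2 + d)
  if c = 0 then
    (if rem = 0 then PySem.List.pyRange (-10) 11 1 else [])
  else
    -- q, r = divmod(rem, c): exact as (floordiv, mod) since c ≠ 0 on this branch
    let q := PySem.Int.floordiv rem c
    let r := PySem.Int.mod rem c
    if r = 0 ∧ -10 ≤ q ∧ q ≤ 10 then [q] else []

def solve_equation_ax3_plus_by2_plus_cz_plus_d_equals_0_alt (a : Int) (b : Int) (c : Int) (d : Int) : String :=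
  PySem.Str.join "" ((PySem.List.pyRange (-10) 11 1).flatMap (fun x =>
    (PySem.List.pyRange (-10) 11 1).flatMap (fun y =>
      (pv_z_candidates a b c d x y).map (fun z =>
        "(" ++ PySem.Int.toStr x ++ ", " ++ PySem.Int.toStr y ++ ", " ++ PySem.Int.toStr z ++ ")\n"))))

-- ===== PRECONDITION & SPEC =====
def Spec_solve_equation_ax3_plus_by2_plus_cz_plus_d_equals_0 (a : Int) (b : Int) (c : Int) (d : Int) (out : String) : Prop := out = solve_equation_ax3_plus_by2_plus_cz_plus_d_equals_0_alt a b c d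
instance (a : Int) (b : Int) (c : Int) (d : Int) (out : String) : Decidable (Spec_solve_equation_ax3_plus_by2_plus_cz_plus_d_equals_0 a b c d out) := by unfold Spec_solve_equation_ax3_plus_by2_plus_cz_plus_d_equals_0; infer_instance

-- ===== CLAIM =====
def Claim_equal_solve_equation_ax3_plus_by2_plus_cz_plus_d_equals_0 : Prop := ∀ (a : Int) (b : Int) (c : Int) (d : Int), Dom_solve_equation_ax3_plus_by2_plus_cz_plus_d_equals_0 a b c d → Spec_solve_equation_ax3_plus_by2_plus_cz_plus_d_equals_0 a b c d (solve_equation_ax3_plus_by2_plus_cz_plus_d_equals_0 a b c d)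

-- ===== LEMMAS AND PROOFS =====

lemma pv_join_nil : PySem.Str.join "" [] = "" := by
  rfl

lemma pv_join_cons (s : String) (l : List String) :
    PySem.Str.join "" (s :: l) = s ++ PySem.Str.join "" l := by
  rw [← String.toList_inj]
  simp [PySem.Str.join, PySem.Chars.join, List.intercalate]
  cases l <;> simp

lemma pv_join_append (l1 l2 : List String) :
    PySem.Str.join "" (l1 ++ l2) = PySem.Str.join "" l1 ++ PySem.Str.join "" l2 := by
  induction l1 with
  | nil => rw [List.nil_append, pv_join_nil, String.empty_append]
  | cons s l ih => rw [List.cons_append, pv_join_cons, pv_join_cons, ih, String.append_assoc]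

-- a filtering string-fold is init ++ the join of the kept formatted elements
lemma pv_fold_if (p : Int → Prop) [DecidablePred p] (f : Int → String) :
    ∀ (zs : List Int) (sv : String),
    zs.foldl (fun sv z => if p z then sv ++ f z else sv) sv
      = sv ++ PySem.Str.join "" ((zs.filter (fun z => decide (p z))).map f) := by
  intro zs
  induction zs with
  | nil => intro sv; rw [List.foldl_nil, List.filter_nil, List.map_nil, pv_join_nil, String.append_empty]
  | cons z zs ih =>
    intro sv
    by_cases h : p z
    · rw [List.foldl_cons, if_pos h, ih, List.filter_cons_of_pos (by simp [h]),
        List.map_cons, pv_join_cons, String.append_assoc]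
    · rw [List.foldl_cons, if_neg h, ih, List.filter_cons_of_neg (by simp [h])]

-- an appending string-fold is init ++ the join of the mapped elements
lemma pv_fold_app (g : Int → String) :
    ∀ (l : List Int) (sv : String),
    l.foldl (fun sv x => sv ++ g x) sv = sv ++ PySem.Str.join "" (l.map g) := by
  intro l
  induction l with
  | nil => intro sv; rw [List.foldl_nil, List.map_nil, pv_join_nil, String.append_empty]
  | cons x l ih =>
    intro sv
    rw [List.foldl_cons, ih, List.map_cons, pv_join_cons, String.append_assoc]

lemma pv_join_flatMap (l : List Int) (g : Int → List String) :
    PySem.Str.join "" (l.flatMap g) = PySem.Str.join "" (l.map (fun x => PySem.Str.join "" (g x))) := by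
  induction l with
  | nil => rfl
  | cons x l ih => rw [List.flatMap_cons, pv_join_append, List.map_cons, pv_join_cons, ih]

-- filtering for the unique value q on a duplicate-free list
lemma pv_filter_eq (q : Int) (zs : List Int) (hnd : zs.Nodup) :
    zs.filter (fun z => decide (q = z)) = if q ∈ zs then [q] else [] := by
  induction zs with
  | nil => simp
  | cons z zs ih =>
    rw [List.nodup_cons] at hnd
    by_cases hz : q = z
    · subst hz
      rw [List.filter_cons_of_pos (by simp), ih hnd.2, if_neg hnd.1,
        if_pos List.mem_cons_self]
    · rw [List.filter_cons_of_neg (by simpa using hz), ih hnd.2]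
      simp [List.mem_cons, hz]

-- solving the linear equation c*z = rem (c ≠ 0) via Python floor-division
lemma pv_solve_lin (c rem z : Int) (hc : c ≠ 0) :
    (c * z = rem) ↔ (PySem.Int.mod rem c = 0 ∧ PySem.Int.floordiv rem c = z) := by
  constructor
  · intro h
    subst h
    have hmod : PySem.Int.mod (c * z) c = 0 :=
      (PySem.Int.mod_eq_zero_iff_dvd _ _).2 ⟨z, rfl⟩
    refine ⟨hmod, ?_⟩
    have h2 := PySem.Int.floordiv_mul_add_mod (c * z) c
    rw [hmod, add_zero] at h2
    have h3 : PySem.Int.floordiv (c * z) c * c = z * c := by rw [h2, mul_comm]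
    exact mul_right_cancel₀ hc h3
  · rintro ⟨h1, h2⟩
    have h3 := PySem.Int.floordiv_mul_add_mod rem c
    rw [h1, h2, add_zero] at h3
    rw [← h3, mul_comm]

-- the z's that A's brute-force test keeps are exactly B's division-derived candidates
lemma pv_filter_key (a b c d x y : Int) :
    (PySem.List.pyRange (-10) 11 1).filter
        (fun z => decide (a * x * x * x + b * y * y + c * z + d = 0))
      = pv_z_candidates a b c d x y := by
  have hrem : ∀ z : Int, (a * x * x * x + b * y * y + c * z + d = 0)
      ↔ (c * z = -(a * x ^ 3 + b * y ^ 2 + d)) := by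
    intro z; constructor <;> intro h <;> nlinarith [h]
  unfold pv_z_candidates
  by_cases hc : c = 0
  · subst hc
    rw [if_pos rfl]
    by_cases hr : -(a * x ^ 3 + b * y ^ 2 + d) = 0
    · rw [if_pos hr]
      apply List.filter_eq_self.2
      intro z _
      simp only [decide_eq_true_eq]
      linear_combination -hr
    · rw [if_neg hr]
      apply List.filter_eq_nil_iff.2
      intro z _
      simp only [decide_eq_true_eq]
      intro h
      exact hr (by linear_combination -h)
  · rw [if_neg hc]
    set rem := -(a * x ^ 3 + b * y ^ 2 + d) with hremdef
    have hcond : ∀ z : Int, (a * x * x * x + b * y * y + c * z + d = 0)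
        ↔ (PySem.Int.mod rem c = 0 ∧ PySem.Int.floordiv rem c = z) := by
      intro z; rw [hrem z]; exact pv_solve_lin c rem z hc
    by_cases hm : PySem.Int.mod rem c = 0
    · have : (fun z : Int => decide (a * x * x * x + b * y * y + c * z + d = 0))
          = fun z => decide (PySem.Int.floordiv rem c = z) := by
        funext z; simp [hcond z, hm]
      rw [this, pv_filter_eq _ _ (PySem.List.nodup_pyRange_one (-10) 11)]
      by_cases hq : -10 ≤ PySem.Int.floordiv rem c ∧ PySem.Int.floordiv rem c ≤ 10
      · rw [if_pos (PySem.List.mem_pyRange_one.2 ⟨hq.1, by omega⟩), if_pos ⟨hm, hq⟩]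
      · rw [if_neg (fun hmem => hq (by
            have := PySem.List.mem_pyRange_one.1 hmem; exact ⟨this.1, by omega⟩)),
          if_neg (fun h => hq h.2)]
    · rw [if_neg (fun h => hm h.1)]
      apply List.filter_eq_nil_iff.2
      intro z _
      simp [hcond z, hm]

-- ===== VERDICT =====
theorem solve_equation_ax3_plus_by2_plus_cz_plus_d_equals_0_spec : Claim_equal_solve_equation_ax3_plus_by2_plus_cz_plus_d_equals_0 := by
  unfold Claim_equal_solve_equation_ax3_plus_by2_plus_cz_plus_d_equals_0
  intro a b c d _
  unfold Spec_solve_equation_ax3_plus_by2_plus_cz_plus_d_equals_0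
  unfold solve_equation_ax3_plus_by2_plus_cz_plus_d_equals_0 solve_equation_ax3_plus_by2_plus_cz_plus_d_equals_0_alt
  simp only [pv_fold_if, pv_fold_app, pv_join_flatMap, pv_filter_key, String.empty_append]
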